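-- pv_equiv track=rewrite | github.com/ColinBundschu/phase-edge | src/phaseedge/cli/common.py | _split_on_commas_outside_braces
-- ===== SOURCE A (Python) =====
-- def _split_on_commas_outside_braces(s: str) -> list[str]:
--     parts: list[str] = []
--     buf: list[str] = []
--     depth = 0
--     for ch in s:
--         if ch == "{":
--             depth += 1
--             buf.append(ch)
--         elif ch == "}":
--             if depth == 0:
--                 raise ValueError("Unmatched '}' in composition_map")
--             depth -= 1
--             buf.append(ch)
--         elif ch == "," and depth == 0:
--             piece = "".join(buf).strip()
--             if piece:
--                 parts.append(piece)
--             buf = []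
--         else:
--             buf.append(ch)
--     if depth != 0:
--         raise ValueError("Unmatched '{' in composition_map")
--     last = "".join(buf).strip()
--     if last:
--         parts.append(last)
--     return parts
-- ===== SOURCE B (Python) =====
-- def _split_on_commas_outside_braces(s: str) -> list[str]:
--     # Different decomposition: split on ',' up front, then re-join tokens while
--     # tracking brace depth; flush a piece whenever depth returns to 0 after a token.
--     parts: list[str] = []
--     buf: list[str] = []
--     depth = 0
--     for tok in s.split(','):
--         for ch in tok:
--             if ch == '{':
--                 depth += 1
--             elif ch == '}':
--                 if depth == 0:
--                     raise ValueError("Unmatched '}' in composition_map")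
--                 depth -= 1
--         buf.append(tok)
--         if depth == 0:
--             piece = ','.join(buf).strip()
--             if piece:
--                 parts.append(piece)
--             buf = []
--     if depth != 0:
--         raise ValueError("Unmatched '{' in composition_map")
--     return parts
-- ===== Notes on version B (the rewrite author's own statement) =====
-- stated objective: alternative
-- what changed: B splits the string on the comma separator up front and then re-joins buffered tokens while tracking brace depth, flushing a piece whenever depth returns to zero after a token, instead of A's single character-by-character scan with a char buffer and in-loop flushing at top-level commas.
import Mathlib
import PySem

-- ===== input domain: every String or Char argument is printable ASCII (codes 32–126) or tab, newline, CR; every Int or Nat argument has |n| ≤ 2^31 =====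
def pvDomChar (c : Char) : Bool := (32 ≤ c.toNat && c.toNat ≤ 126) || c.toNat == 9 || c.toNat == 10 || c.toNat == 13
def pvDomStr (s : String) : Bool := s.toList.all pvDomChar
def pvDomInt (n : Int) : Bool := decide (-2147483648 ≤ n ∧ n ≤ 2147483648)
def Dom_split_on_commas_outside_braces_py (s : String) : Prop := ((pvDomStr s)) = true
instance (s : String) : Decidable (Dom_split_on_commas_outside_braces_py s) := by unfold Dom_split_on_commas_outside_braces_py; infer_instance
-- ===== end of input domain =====

-- B re-decomposes A's single char-scan: split the string at commas first, then re-join buffered tokens by brace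
-- depth (objective: alternative decomposition, same O(n) cost). On unbalanced-brace inputs the
-- Python A raises ValueError; those inputs are excluded by Pre_ and both ports return [] there.

-- ===== PORT A =====
-- A's loop state: (parts, buf, depth); `none` models the ValueError raise at an unmatched '}'.
def pyA_loop : List Char → List String → List Char → Int → Option (List String × List Char × Int)
  | [], parts, buf, depth => some (parts, buf, depth)
  | ch :: rest, parts, buf, depth =>
    if ch = '{' then pyA_loop rest parts (buf ++ [ch]) (depth + 1)
    else if ch = '}' then
      if depth = 0 then none
      else pyA_loop rest parts (buf ++ [ch]) (depth - 1)
    else if ch = ',' ∧ depth = 0 then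
      let piece := PySem.Chars.strip buf
      pyA_loop rest (if piece ≠ [] then parts ++ [String.ofList piece] else parts) [] depth
    else pyA_loop rest parts (buf ++ [ch]) depth

-- A's code after the loop ("if depth != 0: raise …; last = … ; return parts").
def pyA_post : Option (List String × List Char × Int) → List String
  | none => []                                  -- raise ValueError "Unmatched '}'…" (outside Pre_)
  | some (parts, buf, depth) =>
    if depth ≠ 0 then []                        -- raise ValueError "Unmatched '{'…" (outside Pre_)
    else
      let last := PySem.Chars.strip buf
      if last ≠ [] then parts ++ [String.ofList last] else parts

def split_on_commas_outside_braces_py (s : String) : List String :=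
  pyA_post (pyA_loop s.toList [] [] 0)

-- ===== PORT B =====
-- B's inner char loop over one token: only the brace depth changes; `none` = unmatched '}'.
def pyB_depth : List Char → Int → Option Int
  | [], depth => some depth
  | ch :: rest, depth =>
    if ch = '{' then pyB_depth rest (depth + 1)
    else if ch = '}' then
      if depth = 0 then none else pyB_depth rest (depth - 1)
    else pyB_depth rest depth

-- B's outer loop over the tokens of s.split(','): state (parts, buf of tokens, depth).
def pyB_loop : List (List Char) → List String → List (List Char) → Int → Option (List String × List (List Char) × Int)
  | [], parts, buf, depth => some (parts, buf, depth)
  | tok :: rest, parts, buf, depth =>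
    match pyB_depth tok depth with
    | none => none
    | some d =>
      let buf' := buf ++ [tok]
      if d = 0 then
        let piece := PySem.Chars.strip (List.intercalate [','] buf')
        pyB_loop rest (if piece ≠ [] then parts ++ [String.ofList piece] else parts) [] d
      else pyB_loop rest parts buf' d

def pyB_post : Option (List String × List (List Char) × Int) → List String
  | none => []                                  -- raise ValueError "Unmatched '}'…" (outside Pre_)
  | some (parts, _, depth) =>
    if depth ≠ 0 then [] else parts             -- the ≠ branch: raise "Unmatched '{'…" (outside Pre_)

-- s.split(',') is ported as List.splitOn ',' on the char list (exact for a 1-char separator);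
-- ','.join is List.intercalate [','], .strip is PySem.Chars.strip.
def split_on_commas_outside_braces_py_alt (s : String) : List String :=
  pyB_post (pyB_loop (s.toList.splitOn ',') [] [] 0)

-- ===== PRECONDITION & SPEC =====
-- Pre_ excludes exactly the inputs on which the Python A raises ValueError: strings whose braces
-- are unbalanced (some prefix has more '}' than '{', or the total counts differ).
def Pre_split_on_commas_outside_braces_py (s : String) : Prop :=
  (∀ i ≤ s.toList.length, (s.toList.take i).count '}' ≤ (s.toList.take i).count '{') ∧
    s.toList.count '{' = s.toList.count '}'
instance (s : String) : Decidable (Pre_split_on_commas_outside_braces_py s) := by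
  unfold Pre_split_on_commas_outside_braces_py; infer_instance

def pvWitness_split_on_commas_outside_braces_py : String := " a ,{b, c}, d "

def Spec_split_on_commas_outside_braces_py (s : String) (out : List String) : Prop := out = split_on_commas_outside_braces_py_alt s
instance (s : String) (out : List String) : Decidable (Spec_split_on_commas_outside_braces_py s out) := by unfold Spec_split_on_commas_outside_braces_py; infer_instance

-- ===== CLAIM (what is proved, stated in full; the proofs are below) =====
def Claim_equal_split_on_commas_outside_braces_py : Prop := ∀ (s : String), Dom_split_on_commas_outside_braces_py s → Pre_split_on_commas_outside_braces_py s → Spec_split_on_commas_outside_braces_py s (split_on_commas_outside_braces_py s)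

-- ===== LEMMAS AND PROOFS =====

-- Every piece produced by splitOnP satisfies ¬p on all its elements.
theorem splitOnP_pieces_not {α : Type} (p : α → Bool) (cs : List α) :
    ∀ t ∈ cs.splitOnP p, ∀ x ∈ t, ¬ p x := by
  induction cs with
  | nil => simp [List.splitOnP_nil]
  | cons c cs ih =>
    intro t ht x hx
    rw [List.splitOnP_cons] at ht
    by_cases hc : p c
    · simp [hc] at ht
      rcases ht with h | h
      · simp [h] at hx
      · exact ih t h x hx
    · simp [hc] at ht
      obtain ⟨u, us, hus⟩ := List.exists_cons_of_ne_nil (List.splitOnP_ne_nil p cs)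
      rw [hus] at ht
      simp [List.modifyHead] at ht
      rcases ht with h | h
      · subst h
        rcases List.mem_cons.mp hx with h2 | h2
        · subst h2; exact hc
        · exact ih u (by rw [hus]; exact List.mem_cons_self) x h2
      · exact ih t (by rw [hus]; exact List.mem_cons_of_mem _ h) x hx

-- A's char loop over a comma-free chunk only appends the chunk to buf and tracks depth like B's
-- inner scan (both fail at the same unmatched '}').
theorem pyA_loop_chunk (cs : List Char) (h : ',' ∉ cs) :
    ∀ (ys : List Char) (parts : List String) (buf : List Char) (depth : Int),
      pyA_loop (cs ++ ys) parts buf depth =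
        match pyB_depth cs depth with
        | none => none
        | some d => pyA_loop ys parts (buf ++ cs) d := by
  induction cs with
  | nil => intro ys parts buf depth; simp [pyB_depth]
  | cons c cs ih =>
    intro ys parts buf depth
    have hc : c ≠ ',' := fun hc => h (hc ▸ List.mem_cons_self)
    have h' : ',' ∉ cs := fun hm => h (List.mem_cons_of_mem _ hm)
    by_cases h1 : c = '{'
    · subst h1
      simp only [List.cons_append, pyA_loop, pyB_depth]
      simp only [if_true]
      rw [ih h']
      cases pyB_depth cs (depth + 1) <;> simp
    · by_cases h2 : c = '}'
      · subst h2
        by_cases hd : depth = 0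
        · simp [pyA_loop, pyB_depth, hd]
        · simp only [List.cons_append, pyA_loop, pyB_depth, if_neg h1, if_neg hd]
          rw [ih h']
          cases pyB_depth cs (depth - 1) <;> simp
      · simp only [List.cons_append, pyA_loop, pyB_depth, if_neg h1, if_neg h2]
        have hcd : ¬ (c = ',' ∧ depth = 0) := fun hp => hc hp.1
        rw [if_neg hcd, ih h']
        cases pyB_depth cs depth <;> simp

-- The invariant tying A's char state to B's token state right before each token is processed.
def pvRel (partsA : List String) (bufA : List Char) (partsB : List String)
    (bufB : List (List Char)) (depth : Int) : Prop :=
  if depth = 0 then bufA = [] ∧ bufB = [] ∧ partsA = partsB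
  else bufB ≠ [] ∧ bufA = List.intercalate [','] bufB ++ [','] ∧ partsA = partsB

theorem intercalate_append_singleton (bufB : List (List Char)) (t : List Char) (h : bufB ≠ []) :
    List.intercalate [','] (bufB ++ [t]) = List.intercalate [','] bufB ++ [','] ++ t := by
  induction bufB with
  | nil => simp at h
  | cons u us ih =>
    cases us with
    | nil => simp [List.intercalate, List.intersperse]
    | cons v vs =>
      have h2 : v :: vs ≠ [] := by simp
      calc List.intercalate [','] (u :: (v :: vs ++ [t]))
          = u ++ ',' :: List.intercalate [','] (v :: vs ++ [t]) := by
            simp [List.intercalate, List.intersperse]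
        _ = u ++ ',' :: (List.intercalate [','] (v :: vs) ++ [','] ++ t) := by rw [ih h2]
        _ = List.intercalate [','] (u :: v :: vs) ++ [','] ++ t := by
            simp [List.intercalate, List.intersperse]

-- MAIN LEMMA: processing the re-joined token stream char-by-char (A) and token-by-token (B)
-- yields the same final answer, from any pair of states related by pvRel.
theorem pyMain (ts : List (List Char)) (hts : ∀ t ∈ ts, ',' ∉ t) :
    ∀ (partsA : List String) (bufA : List Char) (partsB : List String)
      (bufB : List (List Char)) (depth : Int),
      pvRel partsA bufA partsB bufB depth →
      pyA_post (pyA_loop (List.intercalate [','] ts) partsA bufA depth) =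
        pyB_post (pyB_loop ts partsB bufB depth) := by
  induction ts with
  | nil =>
    intro partsA bufA partsB bufB depth hR
    by_cases hd : depth = 0
    · rw [pvRel, if_pos hd] at hR
      obtain ⟨h1, _, h3⟩ := hR
      simp [pyA_loop, pyB_loop, pyA_post, pyB_post, hd, h1, h3, PySem.Chars.strip,
        PySem.Chars.lstrip, PySem.Chars.rstrip, List.intercalate]
    · rw [pvRel, if_neg hd] at hR
      simp [pyA_loop, pyB_loop, pyA_post, pyB_post, hd, List.intercalate]
  | cons t rest ih =>
    intro partsA bufA partsB bufB depth hR
    have ht : ',' ∉ t := hts t List.mem_cons_self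
    have hrest : ∀ u ∈ rest, ',' ∉ u := fun u hu => hts u (List.mem_cons_of_mem _ hu)
    -- the char stream starts with t
    have hsplit : ∃ ys, List.intercalate [','] (t :: rest) = t ++ ys ∧
        (rest = [] → ys = []) ∧
        (∀ u rs, rest = u :: rs → ys = ',' :: List.intercalate [','] rest) := by
      cases rest with
      | nil => exact ⟨[], by simp [List.intercalate, List.intersperse], fun _ => rfl, by simp⟩
      | cons u rs =>
        exact ⟨',' :: List.intercalate [','] (u :: rs),
          by simp [List.intercalate, List.intersperse], by simp, fun _ _ _ => rfl⟩
    obtain ⟨ys, hys, hnil, hcons⟩ := hsplit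
    rw [hys, pyA_loop_chunk t ht ys partsA bufA depth]
    -- relate bufA ++ t to the joined B buffer
    have hbufA : pvRel partsA bufA partsB bufB depth →
        bufA ++ t = List.intercalate [','] (bufB ++ [t]) := by
      intro hR'
      by_cases hd : depth = 0
      · rw [pvRel, if_pos hd] at hR'
        simp [hR'.1, hR'.2.1, List.intercalate]
      · rw [pvRel, if_neg hd] at hR'
        rw [hR'.2.1, intercalate_append_singleton bufB t hR'.1]
    have hparts : partsA = partsB := by
      by_cases hd : depth = 0
      · rw [pvRel, if_pos hd] at hR; exact hR.2.2
      · rw [pvRel, if_neg hd] at hR; exact hR.2.2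
    cases hdep : pyB_depth t depth with
    | none => simp [pyB_loop, hdep, pyA_post, pyB_post]
    | some d =>
      simp only [pyB_loop, hdep]
      have hjoin : bufA ++ t = List.intercalate [','] (bufB ++ [t]) := hbufA hR
      cases rest with
      | nil =>
        rw [hnil rfl]
        by_cases hd0 : d = 0
        · subst hd0
          simp only [pyA_loop, pyB_loop, pyA_post, pyB_post]
          simp [hjoin, hparts]
        · simp only [if_neg hd0, pyA_loop, pyB_loop, pyA_post, pyB_post]
          simp [hd0]
      | cons u rs =>
        rw [hcons u rs rfl]
        by_cases hd0 : d = 0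
        · subst hd0
          -- A consumes the ',' at depth 0: flush
          simp only [pyA_loop, if_neg (by decide : ¬(',' : Char) = '{'),
            if_neg (by decide : ¬(',' : Char) = '}')]
          simp only [and_self, if_true]
          rw [hjoin, hparts]
          exact ih hrest _ _ _ _ _ (by rw [pvRel]; simp)
        · -- A appends the ',' to buf
          simp only [pyA_loop, if_neg (by decide : ¬(',' : Char) = '{'),
            if_neg (by decide : ¬(',' : Char) = '}')]
          rw [if_neg (by simp [hd0]), if_neg hd0]
          apply ih hrest
          rw [pvRel, if_neg hd0]
          exact ⟨by simp, by rw [← hjoin], hparts⟩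

-- The two ports agree on EVERY string (on excluded inputs both return the [] placeholder).
theorem ports_agree (s : String) :
    split_on_commas_outside_braces_py s = split_on_commas_outside_braces_py_alt s := by
  unfold split_on_commas_outside_braces_py split_on_commas_outside_braces_py_alt
  have hrec : List.intercalate [','] (s.toList.splitOn ',') = s.toList :=
    List.intercalate_splitOn s.toList ','
  have hnc : ∀ t ∈ s.toList.splitOn ',', ',' ∉ t := by
    intro t ht hx
    exact splitOnP_pieces_not (· == ',') s.toList t ht ',' hx (by simp)
  have := pyMain (s.toList.splitOn ',') hnc [] [] [] [] 0 (by rw [pvRel]; simp)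
  rw [hrec] at this
  exact this

-- ===== VERDICT (by name: the statement is the Claim_ definition above) =====
theorem split_on_commas_outside_braces_py_spec : Claim_equal_split_on_commas_outside_braces_py := by
  intro s _ _
  exact ports_agree s
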